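-- pv_equiv track=rewrite | github.com/wotanCode/4GeeksAcademy-Fullstack-Bootcamp-exercises-solutions-2021 | 23day-Learn-Python-Loops-and-lists-Interactively/exercises/16-Techno_beat/app.py | lyrics_generator
-- ===== SOURCE A (Python) =====
-- def lyrics_generator(random_list):
--     word = ""
--     count = 0
--     for number in random_list:
--         if number == 0:
--             word += "Boom "
--             count = 0
--         else:
--             count +=1
--             word += "Drop the base "
--             if count == 3:
--                 word += "!!!Break the base!!! "
--                 count = 0
--     return word
-- ===== SOURCE B (Python) =====
-- def lyrics_generator(random_list):
--     parts = []
--     seg = 0  # length of the current run of non-zero numbers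
--     def flush(k):
--         for i in range(k):
--             parts.append("Drop the base ")
--             if (i + 1) % 3 == 0:
--                 parts.append("!!!Break the base!!! ")
--     for n in random_list:
--         if n == 0:
--             flush(seg)
--             seg = 0
--             parts.append("Boom ")
--         else:
--             seg += 1
--     flush(seg)
--     return "".join(parts)
-- ===== Notes on version B (the rewrite author's own statement) =====
-- stated objective: alternative
-- what changed: B decomposes the input into zero-delimited runs of non-zeros, emits each run's pieces in a single flush (break after every 3rd position in the run) into a piece list, and joins at the end, instead of A's per-element string concatenation with a mutable reset counter.
import Mathlib
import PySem

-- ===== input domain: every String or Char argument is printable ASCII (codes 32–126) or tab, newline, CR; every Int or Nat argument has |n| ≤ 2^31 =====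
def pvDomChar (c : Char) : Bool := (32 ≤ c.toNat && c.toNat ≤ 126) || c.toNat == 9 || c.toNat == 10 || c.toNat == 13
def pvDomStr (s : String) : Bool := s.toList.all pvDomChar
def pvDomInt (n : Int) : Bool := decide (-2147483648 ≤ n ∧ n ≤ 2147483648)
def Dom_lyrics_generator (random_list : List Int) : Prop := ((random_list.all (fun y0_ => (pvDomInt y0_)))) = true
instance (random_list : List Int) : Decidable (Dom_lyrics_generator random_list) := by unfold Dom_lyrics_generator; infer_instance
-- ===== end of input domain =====

-- B differs from A by decomposition: it splits the input into zero-delimited runs of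
-- non-zeros and emits each run's pieces in one flush, joining a piece list at the end,
-- instead of A's per-element string concatenation with a mutable counter (objective: alternative).

-- ===== PORT A =====
def lyrics_generator (random_list : List Int) : String :=
  (random_list.foldl (fun (st : String × Int) number =>
      if number = 0 then (st.1 ++ "Boom ", 0)
      else
        let count := st.2 + 1
        let word := st.1 ++ "Drop the base "
        if count = 3 then (word ++ "!!!Break the base!!! ", 0) else (word, count))
    ("", 0)).1

-- ===== PORT B =====
-- pieces emitted by B's flush(k): "Drop the base " per element, break after every 3rd
def pvFlush (k : Nat) : List String :=
  (List.range k).flatMap (fun i =>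
    "Drop the base " :: (if (i + 1) % 3 = 0 then ["!!!Break the base!!! "] else []))

def lyrics_generator_alt (random_list : List Int) : String :=
  let st := random_list.foldl (fun (st : List String × Nat) n =>
      if n = 0 then (st.1 ++ pvFlush st.2 ++ ["Boom "], 0)
      else (st.1, st.2 + 1)) ([], 0)
  PySem.Str.join "" (st.1 ++ pvFlush st.2)

-- ===== PRECONDITION & SPEC =====
def Spec_lyrics_generator (random_list : List Int) (out : String) : Prop := out = lyrics_generator_alt random_list
instance (random_list : List Int) (out : String) : Decidable (Spec_lyrics_generator random_list out) := by unfold Spec_lyrics_generator; infer_instance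

-- ===== CLAIM (what is proved, stated in full; the proofs are below) =====
def Claim_equal_lyrics_generator : Prop := ∀ (random_list : List Int), Dom_lyrics_generator random_list → Spec_lyrics_generator random_list (lyrics_generator random_list)

-- ===== LEMMAS AND PROOFS =====

def pvJoin (l : List String) : String := PySem.Str.join "" l

lemma pvJoin_nil : pvJoin [] = "" := by
  simp [pvJoin, PySem.Str.join, PySem.Chars.join_nil]

lemma pvJoin_cons (a : String) (b : List String) : pvJoin (a :: b) = a ++ pvJoin b := by
  cases b with
  | nil => simp [pvJoin, PySem.Str.join, PySem.Chars.join_singleton, PySem.Chars.join_nil]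
  | cons x xs => simp [pvJoin, PySem.Str.join, PySem.Chars.join_cons_cons]

lemma pvJoin_append (a b : List String) : pvJoin (a ++ b) = pvJoin a ++ pvJoin b := by
  induction a with
  | nil => simp [pvJoin_nil]
  | cons x xs ih => simp [pvJoin_cons, ih, String.append_assoc]

lemma pvFlush_succ (k : Nat) :
    pvFlush (k + 1) = pvFlush k ++
      ("Drop the base " :: (if (k + 1) % 3 = 0 then ["!!!Break the base!!! "] else [])) := by
  simp [pvFlush, List.range_succ]

-- invariant: A's word = join of B's accumulated pieces plus the partial current run,
-- and A's count is the run length mod 3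
lemma lyrics_loop_eq (l : List Int) (parts : List String) (seg : Nat) :
    (l.foldl (fun (st : String × Int) number =>
      if number = 0 then (st.1 ++ "Boom ", 0)
      else
        let count := st.2 + 1
        let word := st.1 ++ "Drop the base "
        if count = 3 then (word ++ "!!!Break the base!!! ", 0) else (word, count))
      (pvJoin (parts ++ pvFlush seg), (seg : Int) % 3)).1
    = pvJoin ((l.foldl (fun (st : List String × Nat) n =>
        if n = 0 then (st.1 ++ pvFlush st.2 ++ ["Boom "], 0)
        else (st.1, st.2 + 1)) (parts, seg)).1
      ++ pvFlush ((l.foldl (fun (st : List String × Nat) n =>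
        if n = 0 then (st.1 ++ pvFlush st.2 ++ ["Boom "], 0)
        else (st.1, st.2 + 1)) (parts, seg)).2)) := by
  induction l generalizing parts seg with
  | nil => simp
  | cons n l ih =>
    by_cases hn : n = 0
    · subst hn
      have h := ih (parts ++ pvFlush seg ++ ["Boom "]) 0
      have hz : pvJoin (parts ++ pvFlush seg ++ (["Boom "] ++ pvFlush 0))
          = pvJoin (parts ++ pvFlush seg) ++ "Boom " := by
        simp [pvFlush, pvJoin_append, pvJoin_cons, pvJoin_nil, String.append_assoc]
      rw [List.append_assoc (parts ++ pvFlush seg), hz] at h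
      simpa using h
    · simp only [List.foldl_cons, if_neg hn]
      by_cases h3 : (seg : Int) % 3 + 1 = 3
      · have hs : ((seg + 1 : Nat) : Int) % 3 = 0 := by push_cast; omega
        have := ih parts (seg + 1)
        rw [hs] at this
        rw [if_pos h3]
        have hj : pvJoin (parts ++ pvFlush (seg + 1))
            = pvJoin (parts ++ pvFlush seg) ++ "Drop the base " ++ "!!!Break the base!!! " := by
          have hmod : (seg + 1) % 3 = 0 := by omega
          rw [pvFlush_succ, if_pos hmod, ← List.append_assoc, pvJoin_append, pvJoin_append]
          simp [pvJoin_cons, pvJoin_nil, String.append_assoc]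
        rw [← hj]
        simpa using this
      · have hs : ((seg + 1 : Nat) : Int) % 3 = (seg : Int) % 3 + 1 := by push_cast; omega
        have := ih parts (seg + 1)
        rw [hs] at this
        rw [if_neg h3]
        have hj : pvJoin (parts ++ pvFlush (seg + 1))
            = pvJoin (parts ++ pvFlush seg) ++ "Drop the base " := by
          have hmod : ¬ (seg + 1) % 3 = 0 := by omega
          rw [pvFlush_succ, if_neg hmod, ← List.append_assoc, pvJoin_append, pvJoin_append]
          simp [pvJoin_cons, pvJoin_nil, String.append_assoc]
        rw [← hj]
        simpa using this

-- ===== VERDICT (by name: the statement is the Claim_ definition above) =====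
theorem lyrics_generator_spec : Claim_equal_lyrics_generator := by
  intro l _
  show _ = _
  have := lyrics_loop_eq l [] 0
  simpa [lyrics_generator, lyrics_generator_alt, pvJoin, pvFlush] using this
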